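-- pv_equiv track=rewrite | github.com/software-gardening/almanack | src/almanack/metrics/entropy/calculate_entropy.py | _group_commit_events_by_quiet_window
-- ===== SOURCE A (Python) =====
-- from collections import defaultdict
--
-- def _group_commit_events_by_quiet_window(
--     commit_events: list[tuple[int, dict[str, int]]],
--     quiet_time_seconds: int,
-- ) -> list[tuple[int, dict[str, int]]]:
--     """Group commit events into burst periods separated by quiet windows.
--
--     Args:
--         commit_events: Sequence of `(event_time, file_changes)` tuples.
--         quiet_time_seconds: Threshold that starts a new period when exceeded.
--
--     Returns:
--         Time-ordered periods with end timestamp and aggregated file changes.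
--     """
--     commit_events.sort(key=lambda event: event[0])
--     periods: list[tuple[int, dict[str, int]]] = []
--     current_end_time = commit_events[0][0]
--     current_changes: dict[str, int] = defaultdict(int, commit_events[0][1])
--
--     for event_time, event_changes in commit_events[1:]:
--         if event_time - current_end_time > quiet_time_seconds:
--             periods.append((current_end_time, dict(current_changes)))
--             current_changes = defaultdict(int, event_changes)
--         else:
--             for file_name, changed in event_changes.items():
--                 current_changes[file_name] += changed
--         current_end_time = event_time
--
--     periods.append((current_end_time, dict(current_changes)))
--     return periods
-- ===== SOURCE B (Python) =====
-- def _group_commit_events_by_quiet_window(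
--     commit_events,
--     quiet_time_seconds,
-- ):
--     """Two-pass variant: split the sorted events into burst segments first,
--     then aggregate each segment into its (end_time, changes) tuple."""
--     commit_events.sort(key=lambda event: event[0])
--     segments = [[commit_events[0]]]
--     for event in commit_events[1:]:
--         if event[0] - segments[-1][-1][0] > quiet_time_seconds:
--             segments.append([event])
--         else:
--             segments[-1].append(event)
--     periods = []
--     for segment in segments:
--         changes = dict(segment[0][1])
--         for _, event_changes in segment[1:]:
--             for file_name, changed in event_changes.items():
--                 changes[file_name] = changes.get(file_name, 0) + changed
--         periods.append((segment[-1][0], changes))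
--     return periods
-- ===== Notes on version B (the rewrite author's own statement) =====
-- stated objective: alternative
-- what changed: A's single fused loop carrying (periods, current_end_time, current_changes) state is replaced by two separate passes: first split the sorted events into gap-delimited segments, then map each segment to (last timestamp, per-file sum) with a plain dict and .get().
import Mathlib
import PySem

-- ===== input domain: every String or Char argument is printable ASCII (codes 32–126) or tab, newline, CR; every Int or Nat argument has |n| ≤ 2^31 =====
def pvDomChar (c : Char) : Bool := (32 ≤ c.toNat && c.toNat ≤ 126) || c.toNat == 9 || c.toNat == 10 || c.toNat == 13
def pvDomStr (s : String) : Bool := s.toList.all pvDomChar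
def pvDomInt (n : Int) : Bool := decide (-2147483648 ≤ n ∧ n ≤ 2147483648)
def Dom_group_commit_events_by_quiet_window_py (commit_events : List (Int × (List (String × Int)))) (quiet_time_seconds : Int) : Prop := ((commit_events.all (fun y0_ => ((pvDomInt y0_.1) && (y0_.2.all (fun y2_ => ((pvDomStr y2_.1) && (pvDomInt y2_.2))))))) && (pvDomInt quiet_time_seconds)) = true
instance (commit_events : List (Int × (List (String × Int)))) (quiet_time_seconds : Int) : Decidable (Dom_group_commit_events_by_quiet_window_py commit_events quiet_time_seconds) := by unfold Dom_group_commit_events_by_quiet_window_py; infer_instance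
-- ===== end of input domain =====

-- B replaces A's single fused loop by two passes (segment split, then per-segment aggregation); equal return values proved.
-- NOTE: both Pythons sort commit_events IN PLACE; the equivalence proved here is about the RETURN value (B performs the same mutation).

-- ===== PORT A =====
-- current_changes[file_name] += changed  over a defaultdict(int)
def pvMergeA (d : PySem.Dict String Int) (ev : List (String × Int)) : PySem.Dict String Int :=
  ev.foldl (fun d kv => d.modify kv.1 0 (· + kv.2)) d

def pvStepA (q : Int) (st : List (Int × (List (String × Int))) × Int × PySem.Dict String Int)
    (ev : Int × (List (String × Int))) :
    List (Int × (List (String × Int))) × Int × PySem.Dict String Int :=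
  if ev.1 - st.2.1 > q then
    (st.1 ++ [(st.2.1, st.2.2.items)], ev.1, PySem.Dict.ofList ev.2)
  else
    (st.1, ev.1, pvMergeA st.2.2 ev.2)

def group_commit_events_by_quiet_window_py (commit_events : List (Int × (List (String × Int)))) (quiet_time_seconds : Int) : List (Int × (List (String × Int))) :=
  match PySem.List.sorted commit_events (fun event => event.1) with
  | [] => []  -- Python raises IndexError here; excluded by Pre_
  | e0 :: rest =>
    let st := rest.foldl (pvStepA quiet_time_seconds) ([], e0.1, PySem.Dict.ofList e0.2)
    st.1 ++ [(st.2.1, st.2.2.items)]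

-- ===== PORT B =====
-- pass 1 of Source B: split the sorted list into segments at gaps > quiet_time_seconds
def pvSegs (q : Int) : (Int × (List (String × Int))) → List (Int × (List (String × Int))) → List (List (Int × (List (String × Int))))
  | e, [] => [[e]]
  | e, e1 :: rs =>
    if e1.1 - e.1 > q then [e] :: pvSegs q e1 rs
    else
      match pvSegs q e1 rs with
      | [] => [[e]]          -- unreachable: pvSegs never returns []
      | g :: gs => (e :: g) :: gs

-- pass 2 of Source B: one segment ↦ (last timestamp, summed changes via dict.get)
def pvAggSeg (g : List (Int × (List (String × Int)))) : Int × (List (String × Int)) :=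
  match g with
  | [] => (0, [])            -- unreachable: segments are nonempty
  | e :: tl =>
    ((tl.getLastD e).1,
     (tl.foldl (fun d ev => ev.2.foldl (fun d kv => d.insert kv.1 (d.getD kv.1 0 + kv.2)) d)
        (PySem.Dict.ofList e.2)).items)

def group_commit_events_by_quiet_window_py_alt (commit_events : List (Int × (List (String × Int)))) (quiet_time_seconds : Int) : List (Int × (List (String × Int))) :=
  match PySem.List.sorted commit_events (fun event => event.1) with
  | [] => []  -- Python raises IndexError here; excluded by Pre_
  | e0 :: rest => (pvSegs quiet_time_seconds e0 rest).map pvAggSeg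

-- ===== PRECONDITION & SPEC =====
-- Pre_ excludes only the empty list, on which the Python A (and B) raises IndexError.
def Pre_group_commit_events_by_quiet_window_py (commit_events : List (Int × (List (String × Int)))) (quiet_time_seconds : Int) : Prop :=
  commit_events ≠ []
instance (commit_events : List (Int × (List (String × Int)))) (quiet_time_seconds : Int) : Decidable (Pre_group_commit_events_by_quiet_window_py commit_events quiet_time_seconds) := by unfold Pre_group_commit_events_by_quiet_window_py; infer_instance

def pvWitness_group_commit_events_by_quiet_window_py : (List (Int × (List (String × Int)))) × Int :=
  ([(5, [("a.py", 2)]), (1, [("b.py", 1)]), (9, [("a.py", 3)])], 2)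

def Spec_group_commit_events_by_quiet_window_py (commit_events : List (Int × (List (String × Int)))) (quiet_time_seconds : Int) (out : List (Int × (List (String × Int)))) : Prop := out = group_commit_events_by_quiet_window_py_alt commit_events quiet_time_seconds
instance (commit_events : List (Int × (List (String × Int)))) (quiet_time_seconds : Int) (out : List (Int × (List (String × Int)))) : Decidable (Spec_group_commit_events_by_quiet_window_py commit_events quiet_time_seconds out) := by unfold Spec_group_commit_events_by_quiet_window_py; infer_instance

-- ===== CLAIM (what is proved, stated in full; the proofs are below) =====
def Claim_equal_group_commit_events_by_quiet_window_py : Prop := ∀ (commit_events : List (Int × (List (String × Int)))) (quiet_time_seconds : Int), Dom_group_commit_events_by_quiet_window_py commit_events quiet_time_seconds → Pre_group_commit_events_by_quiet_window_py commit_events quiet_time_seconds → Spec_group_commit_events_by_quiet_window_py commit_events quiet_time_seconds (group_commit_events_by_quiet_window_py commit_events quiet_time_seconds)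

-- ===== LEMMAS AND PROOFS =====

-- A's loop, expressed recursively over the remaining events (t = current_end_time, c = current_changes)
def pvF (q : Int) : Int → PySem.Dict String Int → List (Int × (List (String × Int))) → List (Int × (List (String × Int)))
  | t, c, [] => [(t, c.items)]
  | t, c, e1 :: rs =>
    if e1.1 - t > q then (t, c.items) :: pvF q e1.1 (PySem.Dict.ofList e1.2) rs
    else pvF q e1.1 (pvMergeA c e1.2) rs

-- B's dict.get-based sum step equals A's defaultdict += step
lemma pvMerge_eq (d : PySem.Dict String Int) (ev : List (String × Int)) :
    ev.foldl (fun d kv => d.insert kv.1 (d.getD kv.1 0 + kv.2)) d = pvMergeA d ev := by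
  unfold pvMergeA
  induction ev generalizing d with
  | nil => rfl
  | cons kv tl ih =>
    simp only [List.foldl_cons, ih]
    congr 1

-- A's fold with accumulator acc computes acc ++ pvF …
lemma pvA_loop (q : Int) (rs : List (Int × (List (String × Int)))) :
    ∀ (t : Int) (c : PySem.Dict String Int) (acc : List (Int × (List (String × Int)))),
    (let st := rs.foldl (pvStepA q) (acc, t, c); st.1 ++ [(st.2.1, st.2.2.items)])
      = acc ++ pvF q t c rs := by
  induction rs with
  | nil => intro t c acc; simp [pvF]
  | cons e1 rs ih =>
    intro t c acc
    simp only [List.foldl_cons, pvF]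
    by_cases h : e1.1 - t > q
    · simp only [pvStepA, if_pos h, ih, List.append_assoc, List.singleton_append]
    · simp only [pvStepA, if_neg h, ih]

-- B's two passes compute pvF: the first segment starts with e, its dict fold may be seeded by any c
lemma pvB_segs (q : Int) (rs : List (Int × (List (String × Int)))) :
    ∀ (e : Int × (List (String × Int))) (c : PySem.Dict String Int),
    ∃ g gs, pvSegs q e rs = (e :: g) :: gs ∧
      pvF q e.1 c rs
        = ((g.getLastD e).1, (g.foldl (fun d ev => pvMergeA d ev.2) c).items) :: gs.map pvAggSeg := by
  induction rs with
  | nil => intro e c; exact ⟨[], [], rfl, by simp [pvF]⟩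
  | cons e1 rs ih =>
    intro e c
    by_cases h : e1.1 - e.1 > q
    · obtain ⟨g', gs', hseg, hF⟩ := ih e1 (PySem.Dict.ofList e1.2)
      refine ⟨[], pvSegs q e1 rs, by simp [pvSegs, if_pos h], ?_⟩
      simp only [pvF, if_pos h, hF, hseg, List.map_cons, List.foldl_nil, List.getLastD_nil]
      simp [pvAggSeg, pvMerge_eq]
    · obtain ⟨g', gs', hseg, hF⟩ := ih e1 (pvMergeA c e1.2)
      refine ⟨e1 :: g', gs', ?_, ?_⟩
      · simp [pvSegs, if_neg h, hseg]
      · simp only [pvF, if_neg h, hF, List.getLastD_cons, List.foldl_cons]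

-- ===== VERDICT (by name: the statement is the Claim_ definition above) =====
theorem group_commit_events_by_quiet_window_py_spec : Claim_equal_group_commit_events_by_quiet_window_py := by
  intro ce q _ _
  unfold Spec_group_commit_events_by_quiet_window_py
  unfold group_commit_events_by_quiet_window_py group_commit_events_by_quiet_window_py_alt
  cases hs : PySem.List.sorted ce (fun event => event.1) with
  | nil => rfl
  | cons e0 rest =>
    obtain ⟨g, gs, hseg, hF⟩ := pvB_segs q rest e0 (PySem.Dict.ofList e0.2)
    simp only [pvA_loop q rest e0.1 (PySem.Dict.ofList e0.2) [], List.nil_append, hF, hseg,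
      List.map_cons]
    simp [pvAggSeg, pvMerge_eq]
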